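-- pv_equiv track=rewrite | github.com/hooneyskywalker0127/coding-test-practice | 프로그래머스/0/181855. 문자열 묶기/문자열 묶기.py | solution
-- ===== SOURCE A (Python) =====
-- def solution(strArr):
--     strArr_list = []
--     answer = []
--     for a in strArr:
--         strArr_list.append(len(a))
--
--     for b in range(max(strArr_list)+1):
--         answer.append(strArr_list.count(b))
--
--
--
--     return max(answer)
-- ===== SOURCE B (Python) =====
-- def solution(strArr):
--     counts = {}
--     for s in strArr:
--         n = len(s)
--         counts[n] = counts.get(n, 0) + 1
--     return max(counts.values())
-- ===== Notes on version B (the rewrite author's own statement) =====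
-- stated objective: simpler
-- what changed: Replaces A's pass that calls list.count for every length from 0 to max(lengths) with a single dict-counting pass whose value-maximum is returned.
import Mathlib
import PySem

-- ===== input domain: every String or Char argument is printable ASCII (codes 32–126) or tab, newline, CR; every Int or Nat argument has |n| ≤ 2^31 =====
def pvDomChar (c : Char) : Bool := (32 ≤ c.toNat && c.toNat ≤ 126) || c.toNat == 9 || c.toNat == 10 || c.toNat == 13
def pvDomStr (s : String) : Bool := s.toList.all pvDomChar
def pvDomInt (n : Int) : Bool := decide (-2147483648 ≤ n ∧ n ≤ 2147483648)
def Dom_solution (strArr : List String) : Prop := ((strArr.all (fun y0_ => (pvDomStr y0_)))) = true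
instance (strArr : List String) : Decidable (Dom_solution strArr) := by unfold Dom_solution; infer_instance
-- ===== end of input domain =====

-- B replaces A's per-length list.count scan over range(max+1) with a single dict-counting pass (max of the counter's values); return value equivalence on nonempty input.

-- ===== PORT A =====
def solution (strArr : List String) : Int :=
  let strArr_list : List Int := strArr.foldl (fun acc a => acc ++ [PySem.Str.len a]) []
  let answer : List Int :=
    (PySem.List.pyRange 0 (((PySem.List.max? strArr_list (fun x => x)).getD 0) + 1) 1).foldl
      (fun acc b => acc ++ [(PySem.List.count strArr_list b : Int)]) []
  (PySem.List.max? answer (fun x => x)).getD 0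

-- ===== PORT B =====
def solution_alt (strArr : List String) : Int :=
  let counts : PySem.Dict Int Int :=
    strArr.foldl (fun d s =>
      let n := PySem.Str.len s
      d.insert n (d.getD n 0 + 1)) PySem.Dict.empty
  (PySem.List.max? counts.values (fun x => x)).getD 0

-- ===== PRECONDITION & SPEC =====
-- Pre_ excludes only the empty list, on which both Pythons raise ValueError (max of an empty sequence).
def Pre_solution (strArr : List String) : Prop := strArr ≠ []
instance (strArr : List String) : Decidable (Pre_solution strArr) := by unfold Pre_solution; infer_instance
def pvWitness_solution : List String := (["a"])
def Spec_solution (strArr : List String) (out : Int) : Prop := out = solution_alt strArr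
instance (strArr : List String) (out : Int) : Decidable (Spec_solution strArr out) := by unfold Spec_solution; infer_instance

-- ===== CLAIM (what is proved, stated in full; the proofs are below) =====
def Claim_equal_solution : Prop := ∀ (strArr : List String), Dom_solution strArr → Pre_solution strArr → Spec_solution strArr (solution strArr)

-- ===== LEMMAS AND PROOFS =====

-- core fact: for a nonempty list of nonnegative ints, the max of the counts over 0..max
-- equals the max of the counts over the distinct elements
theorem max_count_range_eq_distinct (ls : List Int) (hne : ls ≠ [])
    (hnn : ∀ x ∈ ls, 0 ≤ x) :
    (PySem.List.max? ((PySem.List.pyRange 0 (((PySem.List.max? ls (fun x => x)).getD 0) + 1) 1).map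
        (fun b => (PySem.List.count ls b : Int))) (fun x => x)).getD 0
    = (PySem.List.max? ((PySem.Set.ofList ls).map (fun k => (ls.count k : Int))) (fun x => x)).getD 0 := by
  obtain ⟨m, hm⟩ : ∃ m, PySem.List.max? ls (fun x => x) = some m := by
    cases h : PySem.List.max? ls (fun x => x) with
    | none => exact absurd ((PySem.List.max?_eq_none_iff _ _).mp h) hne
    | some m => exact ⟨m, rfl⟩
  have hmmem : m ∈ ls := PySem.List.max?_mem hm
  have hmax : ∀ y ∈ ls, y ≤ m := fun y hy => PySem.List.max?_isMax hm y hy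
  have hm0 : 0 ≤ m := hnn m hmmem
  rw [hm]
  simp only [Option.getD_some, PySem.List.count_eq]
  -- both mapped lists are nonempty
  have hA : (0:Int) ∈ PySem.List.pyRange 0 (m + 1) 1 :=
    PySem.List.mem_pyRange_one.mpr ⟨le_refl 0, by omega⟩
  obtain ⟨h0, hls⟩ : ∃ h0 hls, ls = h0 :: hls := by
    cases ls with
    | nil => exact absurd rfl hne
    | cons a t => exact ⟨a, t, rfl⟩
  obtain ⟨hls, rfl⟩ := hls
  have hB : h0 ∈ PySem.Set.ofList (h0 :: hls) := (PySem.Set.mem_ofList _ _).mpr (List.mem_cons_self ..)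
  have exmax : ∀ (xs : List Int), xs ≠ [] → ∃ r, PySem.List.max? xs (fun x => x) = some r := by
    intro xs hx
    cases h : PySem.List.max? xs (fun x : Int => x) with
    | none => exact absurd ((PySem.List.max?_eq_none_iff _ _).mp h) hx
    | some r => exact ⟨r, rfl⟩
  obtain ⟨ra, hra⟩ := exmax ((PySem.List.pyRange 0 (m + 1) 1).map
      (fun b => ((h0 :: hls).count b : Int)))
    (by simp only [ne_eq, List.map_eq_nil_iff]; exact List.ne_nil_of_mem hA)
  obtain ⟨rb, hrb⟩ := exmax ((PySem.Set.ofList (h0 :: hls)).map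
      (fun k => ((h0 :: hls).count k : Int)))
    (by simp only [ne_eq, List.map_eq_nil_iff]; exact List.ne_nil_of_mem hB)
  rw [hra, hrb]
  simp only [Option.getD_some]
  -- rb ≤ ra : rb is the count of a member, which lies in the range 0..m
  have hrb_le : rb ≤ ra := by
    obtain ⟨v, hv, hveq⟩ := List.mem_map.mp (PySem.List.max?_mem hrb)
    have hvls : v ∈ h0 :: hls := (PySem.Set.mem_ofList _ _).mp hv
    have hvrange : v ∈ PySem.List.pyRange 0 (m + 1) 1 :=
      PySem.List.mem_pyRange_one.mpr ⟨hnn v hvls, by have := hmax v hvls; omega⟩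
    have : rb ∈ (PySem.List.pyRange 0 (m + 1) 1).map (fun b => ((h0 :: hls).count b : Int)) :=
      List.mem_map.mpr ⟨v, hvrange, hveq⟩
    exact PySem.List.max?_isMax hra rb this
  -- ra ≤ rb : ra is a count over the range; member counts appear on the B side, non-member counts are 0 ≤ rb
  have hra_le : ra ≤ rb := by
    obtain ⟨b, hbrange, hbeq⟩ := List.mem_map.mp (PySem.List.max?_mem hra)
    by_cases hbls : b ∈ h0 :: hls
    · have : ra ∈ (PySem.Set.ofList (h0 :: hls)).map (fun k => ((h0 :: hls).count k : Int)) :=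
        List.mem_map.mpr ⟨b, (PySem.Set.mem_ofList _ _).mpr hbls, hbeq⟩
      exact PySem.List.max?_isMax hrb ra this
    · have hzero : ra = 0 := by
        rw [← hbeq, List.count_eq_zero_of_not_mem hbls]; rfl
      obtain ⟨v, hv, hveq⟩ := List.mem_map.mp (PySem.List.max?_mem hrb)
      have : (0:Int) ≤ rb := by rw [← hveq]; positivity
      omega
  omega

theorem solution_eq (strArr : List String) (hne : strArr ≠ []) :
    solution strArr = solution_alt strArr := by
  unfold solution solution_alt
  simp only [PySem.List.foldl_append_singleton_eq_map, List.nil_append]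
  have hcounter : strArr.foldl (fun d s =>
      let n := PySem.Str.len s
      d.insert n (d.getD n 0 + 1)) PySem.Dict.empty
      = PySem.Dict.counter (strArr.map PySem.Str.len) := by
    rw [← PySem.Dict.foldl_insert_getD_add_one_eq_counter, List.foldl_map]
  rw [hcounter]
  have hvalues : (PySem.Dict.counter (strArr.map PySem.Str.len)).values
      = (PySem.Set.ofList (strArr.map PySem.Str.len)).map
          (fun k => ((strArr.map PySem.Str.len).count k : Int)) := by
    simp only [PySem.Dict.values, PySem.Dict.items_counter, List.map_map]
    rfl
  rw [hvalues]
  apply max_count_range_eq_distinct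
  · simpa using hne
  · intro x hx
    obtain ⟨s, _, rfl⟩ := List.mem_map.mp hx
    simp [PySem.Str.len_eq]

-- ===== VERDICT (by name: the statement is the Claim_ definition above) =====
theorem solution_spec : Claim_equal_solution := by
  intro strArr _ hpre
  unfold Spec_solution
  exact solution_eq strArr hpre
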